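-- pv_equiv track=rewrite | github.com/vmware-labs/verified-betrfs | lib/Crypto/gen2.py | bits64
-- ===== SOURCE A (Python) =====
-- def bits64(d):
--   s = "[\n"
--   for i in range(64):
--     s += "true" if (d>>i)&1 else "false"
--     if i != 63:
--       s += ","
--     if i % 8 == 7:
--       s += "\n"
--     else:
--       s += " "
--   s += "]"
--   return s
-- ===== SOURCE B (Python) =====
-- def bits64(d):
--     words = ['true' if (d >> i) & 1 else 'false' for i in range(64)]
--     rows = [', '.join(words[j:j+8]) for j in range(0, 64, 8)]
--     return '[\n' + ',\n'.join(rows) + '\n]'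
-- ===== Notes on version B (the rewrite author's own statement) =====
-- stated objective: simpler
-- what changed: B builds one 'true'/'false' word per bit in one comprehension and renders the grouped output by nested joins (', ' within each 8-word row, ',\n' between rows) instead of A's character-by-character accumulation with per-index comma/newline tests.
import Mathlib
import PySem

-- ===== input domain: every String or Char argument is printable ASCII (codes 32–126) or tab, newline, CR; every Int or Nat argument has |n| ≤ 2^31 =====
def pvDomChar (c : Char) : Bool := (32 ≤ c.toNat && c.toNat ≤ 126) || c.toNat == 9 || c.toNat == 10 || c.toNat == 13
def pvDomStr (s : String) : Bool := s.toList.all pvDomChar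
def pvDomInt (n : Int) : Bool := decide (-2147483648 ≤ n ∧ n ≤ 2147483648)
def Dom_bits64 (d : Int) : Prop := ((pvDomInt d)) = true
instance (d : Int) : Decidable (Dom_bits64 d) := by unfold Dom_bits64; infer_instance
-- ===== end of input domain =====

-- B builds one 'true'/'false' word per bit once and renders the grouped rows by nested joins (', ' inside a
-- row, ',\n' between rows) instead of A's per-bit comma/newline bookkeeping; objective: simpler.

-- ===== PORT A =====
def bits64 (d : Int) : String :=
  -- i ranges over 0..63, so (i.toNat : Nat) is exact for Python's d >> i
  let s := (PySem.List.pyRange 0 64 1).foldl (fun s i =>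
    let s := s ++ (if PySem.Int.band (d >>> (i.toNat : Nat)) 1 != 0 then "true" else "false")
    let s := if i != 63 then s ++ "," else s
    if PySem.Int.mod i 8 == 7 then s ++ "\n" else s ++ " ") "[\n"
  s ++ "]"

-- ===== PORT B =====
def bits64_alt (d : Int) : String :=
  let words := (PySem.List.pyRange 0 64 1).map
    (fun i => if PySem.Int.band (d >>> (i.toNat : Nat)) 1 != 0 then "true" else "false")
  let rows := (PySem.List.pyRange 0 64 8).map
    (fun j => PySem.Str.join ", " (PySem.List.slice words (some j) (some (j + 8))))
  "[\n" ++ PySem.Str.join ",\n" rows ++ "\n]"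

-- ===== PRECONDITION & SPEC =====
def Spec_bits64 (d : Int) (out : String) : Prop := out = bits64_alt d
instance (d : Int) (out : String) : Decidable (Spec_bits64 d out) := by unfold Spec_bits64; infer_instance

-- ===== CLAIM (what is proved, stated in full; the proofs are below) =====
def Claim_equal_bits64 : Prop := ∀ (d : Int), Dom_bits64 d → Spec_bits64 d (bits64 d)

-- ===== LEMMAS AND PROOFS =====
-- the word written for bit i, and the eight-word row r (proof-only helpers)
def w (d : Int) (i : Int) : String :=
  if PySem.Int.band (d >>> (i.toNat : Nat)) 1 != 0 then "true" else "false"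

def rowStr (d : Int) (r : Nat) : String :=
  match r with
  | 0 => w d 0 ++ ", " ++ w d 1 ++ ", " ++ w d 2 ++ ", " ++ w d 3 ++ ", " ++ w d 4 ++ ", " ++ w d 5 ++ ", " ++ w d 6 ++ ", " ++ w d 7
  | 1 => w d 8 ++ ", " ++ w d 9 ++ ", " ++ w d 10 ++ ", " ++ w d 11 ++ ", " ++ w d 12 ++ ", " ++ w d 13 ++ ", " ++ w d 14 ++ ", " ++ w d 15
  | 2 => w d 16 ++ ", " ++ w d 17 ++ ", " ++ w d 18 ++ ", " ++ w d 19 ++ ", " ++ w d 20 ++ ", " ++ w d 21 ++ ", " ++ w d 22 ++ ", " ++ w d 23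
  | 3 => w d 24 ++ ", " ++ w d 25 ++ ", " ++ w d 26 ++ ", " ++ w d 27 ++ ", " ++ w d 28 ++ ", " ++ w d 29 ++ ", " ++ w d 30 ++ ", " ++ w d 31
  | 4 => w d 32 ++ ", " ++ w d 33 ++ ", " ++ w d 34 ++ ", " ++ w d 35 ++ ", " ++ w d 36 ++ ", " ++ w d 37 ++ ", " ++ w d 38 ++ ", " ++ w d 39
  | 5 => w d 40 ++ ", " ++ w d 41 ++ ", " ++ w d 42 ++ ", " ++ w d 43 ++ ", " ++ w d 44 ++ ", " ++ w d 45 ++ ", " ++ w d 46 ++ ", " ++ w d 47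
  | 6 => w d 48 ++ ", " ++ w d 49 ++ ", " ++ w d 50 ++ ", " ++ w d 51 ++ ", " ++ w d 52 ++ ", " ++ w d 53 ++ ", " ++ w d 54 ++ ", " ++ w d 55
  | 7 => w d 56 ++ ", " ++ w d 57 ++ ", " ++ w d 58 ++ ", " ++ w d 59 ++ ", " ++ w d 60 ++ ", " ++ w d 61 ++ ", " ++ w d 62 ++ ", " ++ w d 63
  | _ => ""

theorem rowA0 (d : Int) (s : String) :
    List.foldl (fun s i =>
      let s := s ++ (if PySem.Int.band (d >>> (i.toNat : Nat)) 1 != 0 then "true" else "false")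
      let s := if i != 63 then s ++ "," else s
      if PySem.Int.mod i 8 == 7 then s ++ "\n" else s ++ " ") s [(0:Int), (1:Int), (2:Int), (3:Int), (4:Int), (5:Int), (6:Int), (7:Int)]
    = s ++ (rowStr d 0 ++ ",\n") := by
  rw [← String.toList_inj]
  simp [rowStr, w, PySem.Int.mod, apply_ite String.toList, String.toList_append,
    (show Int.fmod 0 8 = 0 from rfl), (show Int.fmod 1 8 = 1 from rfl), (show Int.fmod 2 8 = 2 from rfl), (show Int.fmod 3 8 = 3 from rfl), (show Int.fmod 4 8 = 4 from rfl), (show Int.fmod 5 8 = 5 from rfl), (show Int.fmod 6 8 = 6 from rfl), (show Int.fmod 7 8 = 7 from rfl),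
    (show String.toList "[\n" = ['[', '\n'] from rfl),
    (show String.toList "]" = [']'] from rfl),
    (show String.toList "\n]" = ['\n', ']'] from rfl),
    (show String.toList "true" = ['t', 'r', 'u', 'e'] from rfl),
    (show String.toList "false" = ['f', 'a', 'l', 's', 'e'] from rfl),
    (show String.toList "," = [','] from rfl),
    (show String.toList " " = [' '] from rfl),
    (show String.toList "\n" = ['\n'] from rfl),
    (show String.toList ", " = [',', ' '] from rfl),
    (show String.toList ",\n" = [',', '\n'] from rfl)]

theorem rowA1 (d : Int) (s : String) :
    List.foldl (fun s i =>
      let s := s ++ (if PySem.Int.band (d >>> (i.toNat : Nat)) 1 != 0 then "true" else "false")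
      let s := if i != 63 then s ++ "," else s
      if PySem.Int.mod i 8 == 7 then s ++ "\n" else s ++ " ") s [(8:Int), (9:Int), (10:Int), (11:Int), (12:Int), (13:Int), (14:Int), (15:Int)]
    = s ++ (rowStr d 1 ++ ",\n") := by
  rw [← String.toList_inj]
  simp [rowStr, w, PySem.Int.mod, apply_ite String.toList, String.toList_append,
    (show Int.fmod 8 8 = 0 from rfl), (show Int.fmod 9 8 = 1 from rfl), (show Int.fmod 10 8 = 2 from rfl), (show Int.fmod 11 8 = 3 from rfl), (show Int.fmod 12 8 = 4 from rfl), (show Int.fmod 13 8 = 5 from rfl), (show Int.fmod 14 8 = 6 from rfl), (show Int.fmod 15 8 = 7 from rfl),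
    (show String.toList "[\n" = ['[', '\n'] from rfl),
    (show String.toList "]" = [']'] from rfl),
    (show String.toList "\n]" = ['\n', ']'] from rfl),
    (show String.toList "true" = ['t', 'r', 'u', 'e'] from rfl),
    (show String.toList "false" = ['f', 'a', 'l', 's', 'e'] from rfl),
    (show String.toList "," = [','] from rfl),
    (show String.toList " " = [' '] from rfl),
    (show String.toList "\n" = ['\n'] from rfl),
    (show String.toList ", " = [',', ' '] from rfl),
    (show String.toList ",\n" = [',', '\n'] from rfl)]

theorem rowA2 (d : Int) (s : String) :
    List.foldl (fun s i =>
      let s := s ++ (if PySem.Int.band (d >>> (i.toNat : Nat)) 1 != 0 then "true" else "false")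
      let s := if i != 63 then s ++ "," else s
      if PySem.Int.mod i 8 == 7 then s ++ "\n" else s ++ " ") s [(16:Int), (17:Int), (18:Int), (19:Int), (20:Int), (21:Int), (22:Int), (23:Int)]
    = s ++ (rowStr d 2 ++ ",\n") := by
  rw [← String.toList_inj]
  simp [rowStr, w, PySem.Int.mod, apply_ite String.toList, String.toList_append,
    (show Int.fmod 16 8 = 0 from rfl), (show Int.fmod 17 8 = 1 from rfl), (show Int.fmod 18 8 = 2 from rfl), (show Int.fmod 19 8 = 3 from rfl), (show Int.fmod 20 8 = 4 from rfl), (show Int.fmod 21 8 = 5 from rfl), (show Int.fmod 22 8 = 6 from rfl), (show Int.fmod 23 8 = 7 from rfl),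
    (show String.toList "[\n" = ['[', '\n'] from rfl),
    (show String.toList "]" = [']'] from rfl),
    (show String.toList "\n]" = ['\n', ']'] from rfl),
    (show String.toList "true" = ['t', 'r', 'u', 'e'] from rfl),
    (show String.toList "false" = ['f', 'a', 'l', 's', 'e'] from rfl),
    (show String.toList "," = [','] from rfl),
    (show String.toList " " = [' '] from rfl),
    (show String.toList "\n" = ['\n'] from rfl),
    (show String.toList ", " = [',', ' '] from rfl),
    (show String.toList ",\n" = [',', '\n'] from rfl)]

theorem rowA3 (d : Int) (s : String) :
    List.foldl (fun s i =>
      let s := s ++ (if PySem.Int.band (d >>> (i.toNat : Nat)) 1 != 0 then "true" else "false")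
      let s := if i != 63 then s ++ "," else s
      if PySem.Int.mod i 8 == 7 then s ++ "\n" else s ++ " ") s [(24:Int), (25:Int), (26:Int), (27:Int), (28:Int), (29:Int), (30:Int), (31:Int)]
    = s ++ (rowStr d 3 ++ ",\n") := by
  rw [← String.toList_inj]
  simp [rowStr, w, PySem.Int.mod, apply_ite String.toList, String.toList_append,
    (show Int.fmod 24 8 = 0 from rfl), (show Int.fmod 25 8 = 1 from rfl), (show Int.fmod 26 8 = 2 from rfl), (show Int.fmod 27 8 = 3 from rfl), (show Int.fmod 28 8 = 4 from rfl), (show Int.fmod 29 8 = 5 from rfl), (show Int.fmod 30 8 = 6 from rfl), (show Int.fmod 31 8 = 7 from rfl),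
    (show String.toList "[\n" = ['[', '\n'] from rfl),
    (show String.toList "]" = [']'] from rfl),
    (show String.toList "\n]" = ['\n', ']'] from rfl),
    (show String.toList "true" = ['t', 'r', 'u', 'e'] from rfl),
    (show String.toList "false" = ['f', 'a', 'l', 's', 'e'] from rfl),
    (show String.toList "," = [','] from rfl),
    (show String.toList " " = [' '] from rfl),
    (show String.toList "\n" = ['\n'] from rfl),
    (show String.toList ", " = [',', ' '] from rfl),
    (show String.toList ",\n" = [',', '\n'] from rfl)]

theorem rowA4 (d : Int) (s : String) :
    List.foldl (fun s i =>
      let s := s ++ (if PySem.Int.band (d >>> (i.toNat : Nat)) 1 != 0 then "true" else "false")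
      let s := if i != 63 then s ++ "," else s
      if PySem.Int.mod i 8 == 7 then s ++ "\n" else s ++ " ") s [(32:Int), (33:Int), (34:Int), (35:Int), (36:Int), (37:Int), (38:Int), (39:Int)]
    = s ++ (rowStr d 4 ++ ",\n") := by
  rw [← String.toList_inj]
  simp [rowStr, w, PySem.Int.mod, apply_ite String.toList, String.toList_append,
    (show Int.fmod 32 8 = 0 from rfl), (show Int.fmod 33 8 = 1 from rfl), (show Int.fmod 34 8 = 2 from rfl), (show Int.fmod 35 8 = 3 from rfl), (show Int.fmod 36 8 = 4 from rfl), (show Int.fmod 37 8 = 5 from rfl), (show Int.fmod 38 8 = 6 from rfl), (show Int.fmod 39 8 = 7 from rfl),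
    (show String.toList "[\n" = ['[', '\n'] from rfl),
    (show String.toList "]" = [']'] from rfl),
    (show String.toList "\n]" = ['\n', ']'] from rfl),
    (show String.toList "true" = ['t', 'r', 'u', 'e'] from rfl),
    (show String.toList "false" = ['f', 'a', 'l', 's', 'e'] from rfl),
    (show String.toList "," = [','] from rfl),
    (show String.toList " " = [' '] from rfl),
    (show String.toList "\n" = ['\n'] from rfl),
    (show String.toList ", " = [',', ' '] from rfl),
    (show String.toList ",\n" = [',', '\n'] from rfl)]

theorem rowA5 (d : Int) (s : String) :
    List.foldl (fun s i =>
      let s := s ++ (if PySem.Int.band (d >>> (i.toNat : Nat)) 1 != 0 then "true" else "false")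
      let s := if i != 63 then s ++ "," else s
      if PySem.Int.mod i 8 == 7 then s ++ "\n" else s ++ " ") s [(40:Int), (41:Int), (42:Int), (43:Int), (44:Int), (45:Int), (46:Int), (47:Int)]
    = s ++ (rowStr d 5 ++ ",\n") := by
  rw [← String.toList_inj]
  simp [rowStr, w, PySem.Int.mod, apply_ite String.toList, String.toList_append,
    (show Int.fmod 40 8 = 0 from rfl), (show Int.fmod 41 8 = 1 from rfl), (show Int.fmod 42 8 = 2 from rfl), (show Int.fmod 43 8 = 3 from rfl), (show Int.fmod 44 8 = 4 from rfl), (show Int.fmod 45 8 = 5 from rfl), (show Int.fmod 46 8 = 6 from rfl), (show Int.fmod 47 8 = 7 from rfl),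
    (show String.toList "[\n" = ['[', '\n'] from rfl),
    (show String.toList "]" = [']'] from rfl),
    (show String.toList "\n]" = ['\n', ']'] from rfl),
    (show String.toList "true" = ['t', 'r', 'u', 'e'] from rfl),
    (show String.toList "false" = ['f', 'a', 'l', 's', 'e'] from rfl),
    (show String.toList "," = [','] from rfl),
    (show String.toList " " = [' '] from rfl),
    (show String.toList "\n" = ['\n'] from rfl),
    (show String.toList ", " = [',', ' '] from rfl),
    (show String.toList ",\n" = [',', '\n'] from rfl)]

theorem rowA6 (d : Int) (s : String) :
    List.foldl (fun s i =>
      let s := s ++ (if PySem.Int.band (d >>> (i.toNat : Nat)) 1 != 0 then "true" else "false")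
      let s := if i != 63 then s ++ "," else s
      if PySem.Int.mod i 8 == 7 then s ++ "\n" else s ++ " ") s [(48:Int), (49:Int), (50:Int), (51:Int), (52:Int), (53:Int), (54:Int), (55:Int)]
    = s ++ (rowStr d 6 ++ ",\n") := by
  rw [← String.toList_inj]
  simp [rowStr, w, PySem.Int.mod, apply_ite String.toList, String.toList_append,
    (show Int.fmod 48 8 = 0 from rfl), (show Int.fmod 49 8 = 1 from rfl), (show Int.fmod 50 8 = 2 from rfl), (show Int.fmod 51 8 = 3 from rfl), (show Int.fmod 52 8 = 4 from rfl), (show Int.fmod 53 8 = 5 from rfl), (show Int.fmod 54 8 = 6 from rfl), (show Int.fmod 55 8 = 7 from rfl),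
    (show String.toList "[\n" = ['[', '\n'] from rfl),
    (show String.toList "]" = [']'] from rfl),
    (show String.toList "\n]" = ['\n', ']'] from rfl),
    (show String.toList "true" = ['t', 'r', 'u', 'e'] from rfl),
    (show String.toList "false" = ['f', 'a', 'l', 's', 'e'] from rfl),
    (show String.toList "," = [','] from rfl),
    (show String.toList " " = [' '] from rfl),
    (show String.toList "\n" = ['\n'] from rfl),
    (show String.toList ", " = [',', ' '] from rfl),
    (show String.toList ",\n" = [',', '\n'] from rfl)]

theorem rowA7 (d : Int) (s : String) :
    List.foldl (fun s i =>
      let s := s ++ (if PySem.Int.band (d >>> (i.toNat : Nat)) 1 != 0 then "true" else "false")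
      let s := if i != 63 then s ++ "," else s
      if PySem.Int.mod i 8 == 7 then s ++ "\n" else s ++ " ") s [(56:Int), (57:Int), (58:Int), (59:Int), (60:Int), (61:Int), (62:Int), (63:Int)]
    = s ++ (rowStr d 7 ++ "\n") := by
  rw [← String.toList_inj]
  simp [rowStr, w, PySem.Int.mod, apply_ite String.toList, String.toList_append,
    (show Int.fmod 56 8 = 0 from rfl), (show Int.fmod 57 8 = 1 from rfl), (show Int.fmod 58 8 = 2 from rfl), (show Int.fmod 59 8 = 3 from rfl), (show Int.fmod 60 8 = 4 from rfl), (show Int.fmod 61 8 = 5 from rfl), (show Int.fmod 62 8 = 6 from rfl), (show Int.fmod 63 8 = 7 from rfl),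
    (show String.toList "[\n" = ['[', '\n'] from rfl),
    (show String.toList "]" = [']'] from rfl),
    (show String.toList "\n]" = ['\n', ']'] from rfl),
    (show String.toList "true" = ['t', 'r', 'u', 'e'] from rfl),
    (show String.toList "false" = ['f', 'a', 'l', 's', 'e'] from rfl),
    (show String.toList "," = [','] from rfl),
    (show String.toList " " = [' '] from rfl),
    (show String.toList "\n" = ['\n'] from rfl),
    (show String.toList ", " = [',', ' '] from rfl),
    (show String.toList ",\n" = [',', '\n'] from rfl)]

theorem hsplit : PySem.List.pyRange 0 64 1 = [(0:Int), (1:Int), (2:Int), (3:Int), (4:Int), (5:Int), (6:Int), (7:Int)] ++ [(8:Int), (9:Int), (10:Int), (11:Int), (12:Int), (13:Int), (14:Int), (15:Int)] ++ [(16:Int), (17:Int), (18:Int), (19:Int), (20:Int), (21:Int), (22:Int), (23:Int)] ++ [(24:Int), (25:Int), (26:Int), (27:Int), (28:Int), (29:Int), (30:Int), (31:Int)] ++ [(32:Int), (33:Int), (34:Int), (35:Int), (36:Int), (37:Int), (38:Int), (39:Int)] ++ [(40:Int), (41:Int), (42:Int), (43:Int), (44:Int), (45:Int), (46:Int), (47:Int)]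 ++ [(48:Int), (49:Int), (50:Int), (51:Int), (52:Int), (53:Int), (54:Int), (55:Int)] ++ [(56:Int), (57:Int), (58:Int), (59:Int), (60:Int), (61:Int), (62:Int), (63:Int)] := by decide

theorem hrange8 : PySem.List.pyRange 0 64 8 = [0, 8, 16, 24, 32, 40, 48, 56] := by decide

theorem A_rows (d : Int) :
    bits64 d =
      "[\n" ++ (rowStr d 0 ++ ",\n") ++ (rowStr d 1 ++ ",\n") ++ (rowStr d 2 ++ ",\n") ++
        (rowStr d 3 ++ ",\n") ++ (rowStr d 4 ++ ",\n") ++ (rowStr d 5 ++ ",\n") ++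
        (rowStr d 6 ++ ",\n") ++ (rowStr d 7 ++ "\n") ++ "]" := by
  show ((PySem.List.pyRange 0 64 1).foldl _ "[\n") ++ "]" = _
  rw [hsplit]
  rw [List.foldl_append, List.foldl_append, List.foldl_append, List.foldl_append,
      List.foldl_append, List.foldl_append, List.foldl_append]
  rw [rowA0, rowA1, rowA2, rowA3, rowA4, rowA5, rowA6, rowA7]

set_option maxRecDepth 8192 in
theorem B_rows (d : Int) :
    bits64_alt d = "[\n" ++ (rowStr d 0 ++ ",\n" ++ rowStr d 1 ++ ",\n" ++ rowStr d 2 ++ ",\n" ++ rowStr d 3 ++ ",\n" ++ rowStr d 4 ++ ",\n" ++ rowStr d 5 ++ ",\n" ++ rowStr d 6 ++ ",\n" ++ rowStr d 7) ++ "\n]" := by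
  show "[\n" ++ PySem.Str.join ",\n" ((PySem.List.pyRange 0 64 8).map _) ++ "\n]" = _
  rw [hrange8, hsplit]
  rw [← String.toList_inj]
  simp [rowStr, w, PySem.List.slice, PySem.List.clampIdx, PySem.Str.join, PySem.Chars.join,
    List.intercalate, List.intersperse, String.toList_append, apply_ite String.toList,
    (show Int.toNat 64 = 64 from rfl),
    (show String.toList "[\n" = ['[', '\n'] from rfl),
    (show String.toList "]" = [']'] from rfl),
    (show String.toList "\n]" = ['\n', ']'] from rfl),
    (show String.toList "true" = ['t', 'r', 'u', 'e'] from rfl),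
    (show String.toList "false" = ['f', 'a', 'l', 's', 'e'] from rfl),
    (show String.toList "," = [','] from rfl),
    (show String.toList " " = [' '] from rfl),
    (show String.toList "\n" = ['\n'] from rfl),
    (show String.toList ", " = [',', ' '] from rfl),
    (show String.toList ",\n" = [',', '\n'] from rfl)]

-- ===== VERDICT (by name: the statement is the Claim_ definition above) =====
theorem bits64_spec : Claim_equal_bits64 := by
  intro d _
  unfold Spec_bits64
  rw [A_rows, B_rows]
  rw [← String.toList_inj]
  simp [String.toList_append,
    (show String.toList "[\n" = ['[', '\n'] from rfl),
    (show String.toList "]" = [']'] from rfl),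
    (show String.toList "\n]" = ['\n', ']'] from rfl),
    (show String.toList "true" = ['t', 'r', 'u', 'e'] from rfl),
    (show String.toList "false" = ['f', 'a', 'l', 's', 'e'] from rfl),
    (show String.toList "," = [','] from rfl),
    (show String.toList " " = [' '] from rfl),
    (show String.toList "\n" = ['\n'] from rfl),
    (show String.toList ", " = [',', ' '] from rfl),
    (show String.toList ",\n" = [',', '\n'] from rfl)]
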